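-- pv_equiv track=rewrite | github.com/matey97/Algoritmia | Sesion1-2-3/problema3.py | recuperador_camino
-- ===== SOURCE A (Python) =====
-- def recuperador_camino(aristas, target):    ##Problema2
--     dc = {}
--     for u,v in aristas:
--         dc[v]=u
--
--     path=[]
--     path.append(target)
--     while target != dc[target]:
--         target=dc[target]
--         path.append(target)
--     path.reverse()
--     return path
-- ===== SOURCE B (Python) =====
-- def recuperador_camino(aristas, target):
--     dc = {}
--     for u, v in aristas:
--         dc[v] = u
--     # first pass: measure the depth of target's predecessor chain
--     n = target
--     length = 1
--     while n != dc[n]: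
--         n = dc[n]
--         length += 1
--     # second pass: fill a preallocated list back-to-front, no reverse needed
--     path = [None] * length
--     n = target
--     for i in range(length - 1, -1, -1):
--         path[i] = n
--         n = dc[n]
--     return path
-- ===== Notes on version B (the rewrite author's own statement) =====
-- stated objective: alternative
-- what changed: Replaces the append-then-reverse walk by a two-pass scheme: one pass measures the chain depth, a second pass fills a preallocated list back-to-front by index, so no reverse and no append list growth.
import Mathlib
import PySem

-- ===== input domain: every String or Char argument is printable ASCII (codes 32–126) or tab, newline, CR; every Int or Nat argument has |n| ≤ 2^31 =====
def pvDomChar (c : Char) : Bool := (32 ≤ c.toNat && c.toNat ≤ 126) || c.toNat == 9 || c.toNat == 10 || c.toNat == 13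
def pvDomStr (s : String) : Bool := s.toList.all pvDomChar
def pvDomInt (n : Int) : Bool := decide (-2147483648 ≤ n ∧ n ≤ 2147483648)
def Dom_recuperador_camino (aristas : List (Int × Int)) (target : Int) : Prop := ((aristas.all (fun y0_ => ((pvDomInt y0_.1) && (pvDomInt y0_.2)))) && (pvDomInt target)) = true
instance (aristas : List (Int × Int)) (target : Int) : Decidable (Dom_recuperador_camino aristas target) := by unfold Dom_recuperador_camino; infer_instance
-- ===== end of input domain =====

-- B replaces A's append-then-reverse walk by a two-pass scheme (measure chain depth,
-- then fill the path back-to-front); same cost, different decomposition.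


-- ===== PORT A =====
-- the predecessor dict: dc[v] = u for each edge (u, v), later edges overwrite
def pvBuildDict (aristas : List (Int × Int)) : PySem.Dict Int Int :=
  aristas.foldl (fun d p => d.insert p.2 p.1) PySem.Dict.empty

-- A's while loop; fuel bounds the iterations (enough under Pre_); a missing key
-- (Python KeyError) or exhausted fuel (Python non-termination) lies outside Pre_
def pvLoopA (dc : PySem.Dict Int Int) : Nat → Int → List Int → List Int
  | 0, _, path => path.reverse
  | f + 1, t, path =>
    match dc.get? t with
    | none => path.reverse
    | some p => if t = p then path.reverse else pvLoopA dc f p (path ++ [p])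

def recuperador_camino (aristas : List (Int × Int)) (target : Int) : List Int :=
  pvLoopA (pvBuildDict aristas) (aristas.length + 1) target [target]

-- ===== PORT B =====
-- B's first pass: chain depth (acc starts at 1); fuel as in A's loop
def pvLenB (dc : PySem.Dict Int Int) : Nat → Int → Nat → Nat
  | 0, _, acc => acc
  | f + 1, n, acc =>
    match dc.get? n with
    | none => acc
    | some p => if n = p then acc else pvLenB dc f p (acc + 1)

-- B's second pass: for i in range(length-1, -1, -1): path[i] = n; n = dc[n]
-- (filling index i after the recursive call fills 0..i-1 = appending n at the end)
def pvFillB (dc : PySem.Dict Int Int) : Nat → Int → List Int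
  | 0, _ => []
  | k + 1, n =>
    (match dc.get? n with
     | none => pvFillB dc k n      -- Python raises KeyError here; outside Pre_
     | some p => pvFillB dc k p) ++ [n]

def recuperador_camino_alt (aristas : List (Int × Int)) (target : Int) : List Int :=
  let dc := pvBuildDict aristas
  pvFillB dc (pvLenB dc (aristas.length + 1) target 1) target

-- ===== PRECONDITION & SPEC =====
-- last-wins predecessor lookup, stated directly on the input list (not via the ports)
def pvPred? (aristas : List (Int × Int)) (v : Int) : Option Int :=
  (aristas.reverse.find? (fun p => p.2 == v)).map (·.1)

-- the k-th predecessor of v (k chained lookups), none if the chain leaves the dict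
def pvPredIter (aristas : List (Int × Int)) : Nat → Int → Option Int
  | 0, t => some t
  | k + 1, t => (pvPred? aristas t).bind (pvPredIter aristas k)

-- Pre_ = exactly the inputs where Python A returns: some k-th predecessor of target
-- is a root (its own predecessor). Otherwise A raises KeyError or loops forever; a
-- terminating chain visits pairwise-distinct keys, so k ≤ aristas.length is exact,
-- not a size restriction.
def Pre_recuperador_camino (aristas : List (Int × Int)) (target : Int) : Prop :=
  ((List.range (aristas.length + 1)).any (fun k =>
    match pvPredIter aristas k target with
    | some r => pvPred? aristas r == some r
    | none => false)) = true
instance (aristas : List (Int × Int)) (target : Int) : Decidable (Pre_recuperador_camino aristas target) := by unfold Pre_recuperador_camino; infer_instance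

def pvWitness_recuperador_camino : (List (Int × Int)) × Int := ([(1, 1), (1, 2), (2, 3)], 3)

def Spec_recuperador_camino (aristas : List (Int × Int)) (target : Int) (out : List Int) : Prop := out = recuperador_camino_alt aristas target
instance (aristas : List (Int × Int)) (target : Int) (out : List Int) : Decidable (Spec_recuperador_camino aristas target out) := by unfold Spec_recuperador_camino; infer_instance

-- ===== CLAIM (what is proved, stated in full; the proofs are below) =====
def Claim_equal_recuperador_camino : Prop := ∀ (aristas : List (Int × Int)) (target : Int), Dom_recuperador_camino aristas target → Pre_recuperador_camino aristas target → Spec_recuperador_camino aristas target (recuperador_camino aristas target)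

-- ===== LEMMAS AND PROOFS =====

-- ghost chain walk used only in the proofs: the path in root→t order
def pvWalk (dc : PySem.Dict Int Int) : Nat → Int → List Int
  | 0, t => [t]
  | f + 1, t =>
    match dc.get? t with
    | none => [t]
    | some p => if t = p then [t] else pvWalk dc f p ++ [t]

theorem pvWalk_concat (dc : PySem.Dict Int Int) (f : Nat) (t : Int) :
    ∃ L, pvWalk dc f t = L ++ [t] := by
  cases f with
  | zero => exact ⟨[], rfl⟩
  | succ f =>
    unfold pvWalk
    cases h : dc.get? t with
    | none => exact ⟨[], rfl⟩
    | some p =>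
      by_cases hp : t = p
      · simp [hp]
      · exact ⟨pvWalk dc f p, by simp [hp]⟩

theorem pvWalk_dropLast (dc : PySem.Dict Int Int) (f : Nat) (t : Int) :
    (pvWalk dc f t).dropLast ++ [t] = pvWalk dc f t := by
  obtain ⟨L, hL⟩ := pvWalk_concat dc f t
  rw [hL, List.dropLast_concat]

theorem pvLoopA_eq_walk (dc : PySem.Dict Int Int) (f : Nat) (t : Int) (path : List Int) :
    pvLoopA dc f t path = (pvWalk dc f t).dropLast ++ path.reverse := by
  induction f generalizing t path with
  | zero => simp [pvLoopA, pvWalk]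
  | succ f ih =>
    unfold pvLoopA pvWalk
    cases h : dc.get? t with
    | none => simp
    | some p =>
      by_cases hp : t = p
      · simp [hp]
      · simp only [hp, if_false]
        rw [ih]
        have : (pvWalk dc f p ++ [t]).dropLast = pvWalk dc f p := List.dropLast_concat ..
        rw [this, List.reverse_append, ← pvWalk_dropLast dc f p]
        simp

theorem pvLenB_acc (dc : PySem.Dict Int Int) (f : Nat) (n : Int) (a : Nat) :
    pvLenB dc f n (a + 1) = pvLenB dc f n a + 1 := by
  induction f generalizing n a with
  | zero => rfl
  | succ f ih =>
    unfold pvLenB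
    cases h : dc.get? n with
    | none => rfl
    | some p =>
      by_cases hp : n = p
      · simp [hp]
      · simp [hp, ih]

theorem pvFill_len_eq_walk (dc : PySem.Dict Int Int) (f : Nat) (t : Int) :
    pvFillB dc (pvLenB dc f t 1) t = pvWalk dc f t := by
  induction f generalizing t with
  | zero =>
    show pvFillB dc 1 t = [t]
    unfold pvFillB
    cases h : dc.get? t <;> simp [pvFillB]
  | succ f ih =>
    unfold pvLenB pvWalk
    cases h : dc.get? t with
    | none =>
      show pvFillB dc 1 t = [t]
      unfold pvFillB
      simp [pvFillB, h]
    | some p =>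
      by_cases hp : t = p
      · simp only [hp]
        show pvFillB dc 1 p = [p]
        unfold pvFillB
        simp [pvFillB, hp ▸ h]
      · simp only [hp, if_false]
        rw [pvLenB_acc]
        unfold pvFillB
        simp [h, ih]

-- ===== VERDICT (by name: the statement is the Claim_ definition above) =====
theorem recuperador_camino_spec : Claim_equal_recuperador_camino := by
  intro aristas target _ _
  unfold Spec_recuperador_camino recuperador_camino recuperador_camino_alt
  rw [pvLoopA_eq_walk, pvFill_len_eq_walk]
  simpa using pvWalk_dropLast (pvBuildDict aristas) (aristas.length + 1) target
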